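-- pv_equiv track=rewrite | github.com/hawt24/A2SV | 1170-compare-strings-by-frequency-of-the-smallest-character/1170-compare-strings-by-frequency-of-the-smallest-character.py | smallestCharFreq
-- ===== SOURCE A (Python) =====
-- def smallestCharFreq(s):
--     sc = s[0]
--     cnt = 1
--     for idx in range(1,len(s)):
--         c = s[idx]
--
--         if c < sc:
--             cnt = 1
--             sc= c
--         elif c == sc:
--             cnt += 1
--     return cnt
-- ===== SOURCE B (Python) =====
-- def smallestCharFreq(s):
--     t = sorted(s)
--     return t.count(t[0])
-- ===== Notes on version B (the rewrite author's own statement) =====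
-- stated objective: simpler
-- what changed: Replaces A's single-pass running-minimum-and-counter loop with sorting the characters and counting occurrences of the sorted list's head.
import Mathlib
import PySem

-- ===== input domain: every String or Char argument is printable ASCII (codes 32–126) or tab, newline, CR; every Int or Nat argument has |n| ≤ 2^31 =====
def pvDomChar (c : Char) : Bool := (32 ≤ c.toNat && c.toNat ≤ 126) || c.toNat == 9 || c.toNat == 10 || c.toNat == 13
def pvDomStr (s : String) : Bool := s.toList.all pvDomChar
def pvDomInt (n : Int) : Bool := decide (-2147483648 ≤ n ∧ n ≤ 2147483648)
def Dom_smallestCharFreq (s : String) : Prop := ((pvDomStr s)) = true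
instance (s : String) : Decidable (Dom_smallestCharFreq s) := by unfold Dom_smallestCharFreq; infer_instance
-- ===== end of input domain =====

-- B replaces A's running-minimum-and-counter loop by sorting the characters and counting
-- the sorted head ('simpler'; same results wherever A returns, both raise on the empty string).

-- ===== PORT A =====
-- A's loop body: if c < sc: cnt=1; sc=c  elif c == sc: cnt += 1
def pvStepA (st : Char × Int) (c : Char) : Char × Int :=
  if c < st.1 then (c, 1) else if c == st.1 then (st.1, st.2 + 1) else st

def pvLoopA (l : List Char) : Int :=
  match l with
  | [] => 0          -- s[0] raises IndexError in Python; excluded by Pre_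
  | c :: rest => (rest.foldl pvStepA (c, (1 : Int))).2

def smallestCharFreq (s : String) : Int := pvLoopA s.toList

-- ===== PORT B =====
-- t = sorted(s); return t.count(t[0])
def pvSortCount (l : List Char) : Int :=
  match PySem.List.sorted l (fun c => c) false with
  | [] => 0          -- t[0] raises IndexError in Python; excluded by Pre_
  | m :: _ => ((PySem.List.sorted l (fun c => c) false).count m : Int)

def smallestCharFreq_alt (s : String) : Int := pvSortCount s.toList

-- ===== PRECONDITION & SPEC =====
-- Pre_ excludes only the empty string, on which both A and B raise IndexError.
def Pre_smallestCharFreq (s : String) : Prop := s ≠ ""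
instance (s : String) : Decidable (Pre_smallestCharFreq s) := by unfold Pre_smallestCharFreq; infer_instance
def pvWitness_smallestCharFreq : String := "aba"

def Spec_smallestCharFreq (s : String) (out : Int) : Prop := out = smallestCharFreq_alt s
instance (s : String) (out : Int) : Decidable (Spec_smallestCharFreq s out) := by unfold Spec_smallestCharFreq; infer_instance

-- ===== CLAIM (what is proved, stated in full; the proofs are below) =====
def Claim_equal_smallestCharFreq : Prop := ∀ (s : String), Dom_smallestCharFreq s → Pre_smallestCharFreq s → Spec_smallestCharFreq s (smallestCharFreq s)

-- ===== LEMMAS AND PROOFS =====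

lemma foldl_min_mem (rest : List Char) (c : Char) : rest.foldl min c ∈ c :: rest := by
  induction rest generalizing c with
  | nil => simp
  | cons x t ih =>
    simp only [List.foldl]
    rcases min_cases c x with ⟨h', _⟩ | ⟨h', _⟩ <;> rw [h']
    · have h2 := ih c
      rcases List.mem_cons.mp h2 with h | h <;> simp [h]
    · have h2 := ih x
      rcases List.mem_cons.mp h2 with h | h <;> simp [h]

lemma foldl_min_le (rest : List Char) (c : Char) : ∀ y ∈ c :: rest, rest.foldl min c ≤ y := by
  induction rest generalizing c with
  | nil => intro y hy; simp at hy; simp [hy]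
  | cons x t ih =>
    intro y hy
    rcases List.mem_cons.mp hy with h | h
    · rw [h]
      exact le_trans (ih (min c x) _ (List.mem_cons_self)) (min_le_left _ _)
    · rcases List.mem_cons.mp h with h' | h'
      · rw [h']
        exact le_trans (ih (min c x) _ (List.mem_cons_self)) (min_le_right _ _)
      · exact ih (min c x) y (List.mem_cons_of_mem _ h')

lemma loopA (rest : List Char) (sc : Char) (cnt : Int) :
    rest.foldl pvStepA (sc, cnt) =
      (rest.foldl min sc,
        if rest.foldl min sc = sc then cnt + (rest.count sc : Int)
        else (rest.count (rest.foldl min sc) : Int)) := by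
  induction rest generalizing sc cnt with
  | nil => simp
  | cons x t ih =>
    by_cases hlt : x < sc
    · have hmin : min sc x = x := min_eq_right hlt.le
      have hle' : t.foldl min x ≤ x := foldl_min_le t x x List.mem_cons_self
      have hne : t.foldl min x ≠ sc := fun h => absurd hlt (not_lt.mpr (h ▸ hle'))
      simp only [List.foldl, pvStepA, hlt, if_pos]
      rw [ih x 1]
      simp only [List.foldl, hmin]
      by_cases hx : t.foldl min x = x
      · simp [hx, hne, List.count_cons, hlt.ne]
        ring
      · have hnex : ¬ x = t.foldl min x := fun h => hx h.symm
        simp [hx, hne, List.count_cons, hnex]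
    · by_cases heq : x = sc
      · subst heq
        simp only [List.foldl, pvStepA, hlt, if_neg, beq_self_eq_true, if_pos, not_false_iff]
        rw [ih x (cnt + 1)]
        simp only [List.foldl, min_self]
        by_cases hx : t.foldl min x = x
        · simp [hx, List.count_cons]
          ring
        · have hnex : ¬ x = t.foldl min x := fun h => hx h.symm
          simp [hx, List.count_cons, hnex]
      · have hsx : min sc x = sc := min_eq_left (not_lt.mp hlt)
        have hle' : t.foldl min sc ≤ sc := foldl_min_le t sc sc List.mem_cons_self
        have hne2 : ¬ x = t.foldl min sc := by
          intro h
          have hxle : x ≤ sc := by rw [h]; exact hle'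
          exact heq (le_antisymm hxle (not_lt.mp hlt))
        have hbeq : (x == sc) = false := by simp [heq]
        simp only [List.foldl, pvStepA, hlt, if_neg, hbeq, Bool.false_eq_true, not_false_iff]
        rw [ih sc cnt]
        simp only [List.foldl, hsx]
        by_cases hx : t.foldl min sc = sc
        · simp [hx, List.count_cons, heq]
        · simp [hx, List.count_cons, hne2]

lemma A_eq_count (c : Char) (rest : List Char) :
    (rest.foldl pvStepA (c, (1 : Int))).2 = ((c :: rest).count (rest.foldl min c) : Int) := by
  rw [loopA]
  by_cases hx : rest.foldl min c = c
  · simp [hx, List.count_cons]; ring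
  · have : ¬ c = rest.foldl min c := fun h => hx h.symm
    simp [hx, List.count_cons, this]

-- the sorted head is the running minimum
lemma sorted_head_eq_foldl_min (c : Char) (rest : List Char) (m : Char) (t : List Char)
    (hs : PySem.List.sorted (c :: rest) (fun x => x) false = m :: t) :
    m = rest.foldl min c := by
  have hperm : (PySem.List.sorted (c :: rest) (fun x => x) false).Perm (c :: rest) :=
    PySem.List.sorted_perm _ _ _
  have hmem : m ∈ c :: rest := by
    have : m ∈ PySem.List.sorted (c :: rest) (fun x => x) false := by rw [hs]; exact List.mem_cons_self
    exact hperm.mem_iff.mp this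
  have hlb : ∀ y ∈ c :: rest, m ≤ y := PySem.List.key_head_sorted_le _ _ hs
  have hfmem : rest.foldl min c ∈ c :: rest := foldl_min_mem rest c
  exact le_antisymm (hlb _ hfmem) (foldl_min_le rest c m hmem)

lemma list_eq (l : List Char) (h : l ≠ []) : pvLoopA l = pvSortCount l := by
  match l with
  | [] => exact absurd rfl h
  | c :: rest =>
    unfold pvLoopA pvSortCount
    have hsne : PySem.List.sorted (c :: rest) (fun x => x) false ≠ [] := by
      intro hn
      rw [PySem.List.sorted_eq_nil_iff] at hn
      cases hn
    match hst : PySem.List.sorted (c :: rest) (fun x => x) false with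
    | [] => exact absurd hst hsne
    | m :: t =>
      have hm : m = rest.foldl min c := sorted_head_eq_foldl_min c rest m t hst
      have hperm : (PySem.List.sorted (c :: rest) (fun x => x) false).Perm (c :: rest) :=
        PySem.List.sorted_perm _ _ _
      simp only
      have hc : (m :: t).count m = (c :: rest).count m := by
        rw [← hst]; exact hperm.count_eq m
      rw [A_eq_count, ← hm, hc]

-- ===== VERDICT (by name: the statement is the Claim_ definition above) =====
theorem smallestCharFreq_spec : Claim_equal_smallestCharFreq := by
  intro s _ hpre
  have hne : s.toList ≠ [] := by
    intro h
    exact hpre (by simpa using congrArg String.ofList h)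
  exact list_eq s.toList hne
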